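-- pv_equiv track=rewrite | github.com/MrBrantCode/unitest_baseline | mut_generate/mist_train_cf/cf_41304/solution.py | searchWordIndex
-- ===== SOURCE A (Python) =====
-- def searchWordIndex(sentence: str, searchWord: str) -> int:
--     if sentence.startswith(searchWord):
--         return 0
--     def computeLPSArray(pattern):
--         lps = [0] * len(pattern)
--         length = 0
--         i = 1
--         while i < len(pattern):
--             if pattern[i] == pattern[length]:
--                 length += 1
--                 lps[i] = length
--                 i += 1
--             else:
--                 if length != 0:
--                     length = lps[length - 1]
--                 else:
--                     lps[i] = 0
--                     i += 1
--         return lps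
--
--     def KMP(text, pattern):
--         lps = computeLPSArray(pattern)
--         i, j = 0, 0
--         while i < len(text):
--             if pattern[j] == text[i]:
--                 i += 1
--                 j += 1
--             if j == len(pattern):
--                 return i - j
--             elif i < len(text) and pattern[j] != text[i]:
--                 if j != 0:
--                     j = lps[j - 1]
--                 else:
--                     i += 1
--         return -1
--     p = KMP(sentence, ' ' + searchWord)
--     if p == -1:
--         return -1
--     return p - 1
-- ===== SOURCE B (Python) =====
-- def searchWordIndex(sentence: str, searchWord: str) -> int:
--     if sentence.startswith(searchWord):
--         return 0
--     p = sentence.find(' ' + searchWord)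
--     return -1 if p == -1 else p - 1
-- ===== Notes on version B (the rewrite author's own statement) =====
-- stated objective: simpler
-- what changed: Replaces the hand-written KMP automaton (explicit LPS-table construction plus a manual two-index scan) with a single built-in substring search: sentence.find(' ' + searchWord), adjusting the not-found and found cases.
import Mathlib
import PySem

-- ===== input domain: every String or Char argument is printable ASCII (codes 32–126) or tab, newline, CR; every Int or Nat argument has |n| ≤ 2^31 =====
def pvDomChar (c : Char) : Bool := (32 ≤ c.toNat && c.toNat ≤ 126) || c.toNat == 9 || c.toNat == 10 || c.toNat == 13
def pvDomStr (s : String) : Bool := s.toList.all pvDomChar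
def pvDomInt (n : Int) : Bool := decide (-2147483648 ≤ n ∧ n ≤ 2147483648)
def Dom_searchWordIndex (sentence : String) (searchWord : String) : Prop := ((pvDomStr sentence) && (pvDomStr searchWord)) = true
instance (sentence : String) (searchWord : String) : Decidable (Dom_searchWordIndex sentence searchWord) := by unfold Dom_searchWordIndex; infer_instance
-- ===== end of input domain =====

-- B replaces A's hand-written KMP (LPS-table construction + two-index scan) by the built-in
-- first-occurrence substring search (str.find); objective: simpler, same return value everywhere.

-- ===== PORT A =====
-- the inner `while` loops of computeLPSArray / KMP carry a fuel counter as a totality guard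
-- (the initial fuel is proved sufficient below; the fuel-0 branch is unreachable)
def lpsLoop (p : List Char) : Nat → List Nat → Nat → Nat → List Nat
  | 0, lps, _, _ => lps
  | fuel+1, lps, len, i =>
    if i < p.length then
      if p.getD i ' ' = p.getD len ' ' then
        lpsLoop p fuel (lps.set i (len+1)) (len+1) (i+1)
      else if len ≠ 0 then
        lpsLoop p fuel lps (lps.getD (len-1) 0) i
      else
        lpsLoop p fuel (lps.set i 0) len (i+1)
    else lps

def computeLPSArray (p : List Char) : List Nat :=
  lpsLoop p (2*p.length+2) (List.replicate p.length 0) 0 1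

def kmpLoop (t p : List Char) (lps : List Nat) : Nat → Nat → Nat → Int
  | 0, _, _ => -1
  | fuel+1, i, j =>
    if i < t.length then
      -- the body first advances (i, j) on a character match, exactly as the Python does
      let ij := if p.getD j ' ' = t.getD i ' ' then (i+1, j+1) else (i, j)
      if ij.2 = p.length then (ij.1 : Int) - (ij.2 : Int)
      else if ij.1 < t.length ∧ p.getD ij.2 ' ' ≠ t.getD ij.1 ' ' then
        if ij.2 ≠ 0 then kmpLoop t p lps fuel ij.1 (lps.getD (ij.2 - 1) 0)
        else kmpLoop t p lps fuel (ij.1 + 1) ij.2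
      else kmpLoop t p lps fuel ij.1 ij.2
    else -1

def KMP (t p : List Char) : Int := kmpLoop t p (computeLPSArray p) (2*t.length+2) 0 0

def searchWordIndex (sentence : String) (searchWord : String) : Int :=
  if PySem.Chars.startswith sentence.toList searchWord.toList then 0
  else
    let p := KMP sentence.toList (' ' :: searchWord.toList)
    if p = -1 then -1 else p - 1

-- ===== PORT B =====
def searchWordIndex_alt (sentence : String) (searchWord : String) : Int :=
  if PySem.Chars.startswith sentence.toList searchWord.toList then 0
  else
    let p := PySem.Chars.find sentence.toList (' ' :: searchWord.toList)
    if p = -1 then -1 else p - 1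

-- ===== PRECONDITION & SPEC =====
def Spec_searchWordIndex (sentence : String) (searchWord : String) (out : Int) : Prop := out = searchWordIndex_alt sentence searchWord
instance (sentence : String) (searchWord : String) (out : Int) : Decidable (Spec_searchWordIndex sentence searchWord out) := by unfold Spec_searchWordIndex; infer_instance

-- ===== CLAIM (what is proved, stated in full; the proofs are below) =====
def Claim_equal_searchWordIndex : Prop := ∀ (sentence : String) (searchWord : String), Dom_searchWordIndex sentence searchWord → Spec_searchWordIndex sentence searchWord (searchWordIndex sentence searchWord)

-- ===== LEMMAS AND PROOFS =====

-- `brd q` = length of the longest proper border of q (prefix of q that is also a suffix)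
def brd (q : List Char) : Nat := Nat.findGreatest (fun k => k < q.length ∧ q.take k <:+ q) q.length

lemma brd_border {q : List Char} (hq : q ≠ []) : brd q < q.length ∧ q.take (brd q) <:+ q := by
  unfold brd
  exact Nat.findGreatest_spec (P := fun k => k < q.length ∧ q.take k <:+ q) (n := q.length)
    (Nat.zero_le _) ⟨List.length_pos_iff.mpr hq, by simp⟩

lemma le_brd {q : List Char} {k : Nat} (h1 : k < q.length) (h2 : q.take k <:+ q) : k ≤ brd q :=
  Nat.le_findGreatest (le_of_lt h1) ⟨h1, h2⟩

lemma getD_take {p : List Char} {i k : Nat} (hk : k < i) (hp : k < p.length) :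
    (p.take i).getD k ' ' = p.getD k ' ' := by
  rw [List.getD_eq_getElem _ _ (by simp; omega), List.getD_eq_getElem _ _ hp, List.getElem_take]

lemma getD_drop {t : List Char} {s k : Nat} (h : s + k < t.length) :
    (t.drop s).getD k ' ' = t.getD (s + k) ' ' := by
  rw [List.getD_eq_getElem _ _ (by simp; omega), List.getD_eq_getElem _ _ h]
  exact List.getElem_drop

lemma getD_of_prefix {u v : List Char} {k : Nat} (h : u <+: v) (hk : k < u.length) :
    u.getD k ' ' = v.getD k ' ' := by
  obtain ⟨r, rfl⟩ := h
  rw [List.getD_eq_getElem _ _ hk, List.getD_eq_getElem _ _ (by simp; omega)]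
  exact (List.getElem_append_left hk).symm

lemma take_succ_getD {p : List Char} {i : Nat} (hi : i < p.length) :
    p.take (i+1) = p.take i ++ [p.getD i ' '] := by
  rw [List.take_add_one, List.getElem?_eq_getElem hi, List.getD_eq_getElem _ _ hi]
  rfl

-- borders of q ++ [c] of positive length, characterised over q
lemma border_append {q : List Char} {c : Char} {k : Nat} :
    (k+1 < (q ++ [c]).length ∧ (q ++ [c]).take (k+1) <:+ (q ++ [c])) ↔
      (k < q.length ∧ q.take k <:+ q ∧ q.getD k ' ' = c) := by
  constructor
  · rintro ⟨h1, h2⟩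
    have hk : k < q.length := by simp at h1; omega
    rw [List.take_append_of_le_length (by omega), take_succ_getD hk] at h2
    rw [← List.reverse_prefix] at h2
    simp only [List.reverse_append, List.reverse_singleton, List.singleton_append] at h2
    rw [List.cons_prefix_cons] at h2
    exact ⟨hk, List.reverse_prefix.mp h2.2, h2.1⟩
  · rintro ⟨hk, hsuf, hc⟩
    refine ⟨by simp; omega, ?_⟩
    rw [List.take_append_of_le_length (by omega), take_succ_getD hk, ← List.reverse_prefix]
    simp only [List.reverse_append, List.reverse_singleton, List.singleton_append]
    rw [List.cons_prefix_cons]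
    exact ⟨hc, List.reverse_prefix.mpr hsuf⟩

-- every proper border of q ++ [c] is at most brd q + 1 (for any c)
lemma borders_bounded_of_brd {q : List Char} (c : Char) :
    ∀ b, b < q.length + 1 → (q ++ [c]).take b <:+ (q ++ [c]) → b ≤ brd q + 1 := by
  rintro (_ | b) hb hsuf
  · omega
  · have h := border_append.mp ⟨by simp; omega, hsuf⟩
    have := le_brd h.1 h.2.1
    omega

-- a suffix of a matched window is matched at the shifted position
lemma prefix_drop_of_suffix_of_prefix {u q t : List Char} {s : Nat}
    (hq : q <+: t.drop s) (hu : u <:+ q) :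
    u <+: t.drop (s + (q.length - u.length)) := by
  obtain ⟨w, rfl⟩ := hu
  obtain ⟨r, hr⟩ := hq
  have hlen : (w ++ u).length - u.length = w.length := by simp
  refine ⟨r, ?_⟩
  rw [hlen, ← List.drop_drop, ← hr, List.append_assoc, List.drop_left]

lemma matched_extend {t p : List Char} {i j : Nat} (hij : j ≤ i) (hi : i < t.length)
    (hj : j < p.length) (h : p.take j <+: t.drop (i - j))
    (hc : p.getD j ' ' = t.getD i ' ') :
    p.take (j+1) <+: t.drop (i - j) := by
  rw [List.prefix_iff_eq_take] at h ⊢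
  have hlen1 : (p.take j).length = j := by simp; omega
  have hlen2 : (p.take (j+1)).length = j + 1 := by simp; omega
  have hjd : j < (t.drop (i - j)).length := by simp; omega
  rw [hlen1] at h
  rw [hlen2, take_succ_getD hj, List.take_add_one, List.getElem?_eq_getElem hjd, ← h]
  have : (t.drop (i - j))[j] = t.getD i ' ' := by
    rw [List.getElem_drop (h := hjd), List.getD_eq_getElem _ _ (by omega : i < t.length)]
    congr 1
    omega
  rw [this, hc]
  rfl

-- after a mismatch at text position I with J characters matched, no occurrence of p can
-- start strictly between I - J and I - brd (p.take J)
lemma no_occ_of_mismatch {t p : List Char} {I J s : Nat} (hJ1 : 1 ≤ J) (hJm : J < p.length)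
    (hJI : J ≤ I) (hIn : I < t.length)
    (hmatch : p.take J <+: t.drop (I - J))
    (hmis : p.getD J ' ' ≠ t.getD I ' ')
    (hs1 : I - J ≤ s) (hs2 : s < I - brd (p.take J)) :
    ¬ p <+: t.drop s := by
  intro hocc
  have hltlen : (p.take J).length = J := by simp; omega
  by_cases hcase : I - s = J
  · have hchar := getD_of_prefix hocc (k := J) hJm
    rw [getD_drop (by omega : s + J < t.length)] at hchar
    have hsJ : s + J = I := by omega
    rw [hsJ] at hchar
    exact hmis hchar
  · have hlJ2 : I - s < J := by omega
    have h1 : p.take (I - s) <+: t.drop s := (List.take_prefix (I - s) p).trans hocc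
    have h2 : (p.take J).drop (J - (I - s)) <+: t.drop ((I - J) + (J - (I - s))) := by
      obtain ⟨r, hr⟩ := hmatch
      refine ⟨r, ?_⟩
      rw [← List.drop_drop, ← hr, List.drop_append_of_le_length (by rw [hltlen]; omega)]
    have heq : I - J + (J - (I - s)) = s := by omega
    rw [heq] at h2
    have hlen1 : (p.take (I - s)).length = I - s := by simp; omega
    have hlen2 : ((p.take J).drop (J - (I - s))).length = I - s := by simp; omega
    have heq2 : p.take (I - s) = (p.take J).drop (J - (I - s)) :=
      (List.prefix_of_prefix_length_le h1 h2 (by omega)).eq_of_length (by omega)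
    have hsuf : p.take (I - s) <:+ p.take J := heq2 ▸ List.drop_suffix _ _
    have : I - s ≤ brd (p.take J) := by
      refine le_brd (by rw [hltlen]; omega) ?_
      rw [List.take_take, min_eq_left (le_of_lt hlJ2)]
      exact hsuf
    omega

lemma find_eq_of_first {t p : List Char} {k : Nat}
    (h1 : p <+: t.drop k) (h2 : ∀ s, s < k → ¬ p <+: t.drop s) :
    PySem.Chars.find t p = (k : Int) := by
  have hinf : p <:+: t := h1.isInfix.trans (List.drop_suffix k t).isInfix
  have hnn : 0 ≤ PySem.Chars.find t p := (PySem.Chars.find_nonneg_iff t p).mpr hinf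
  obtain ⟨ha, hb⟩ := PySem.Chars.find_spec hnn
  have : (PySem.Chars.find t p).toNat = k := by
    rcases lt_trichotomy (PySem.Chars.find t p).toNat k with h | h | h
    · exact absurd ha (h2 _ h)
    · exact h
    · exact absurd h1 (hb k h)
  omega

lemma find_eq_neg_one_of_no_occ {t p : List Char} (h : ∀ s, ¬ p <+: t.drop s) :
    PySem.Chars.find t p = -1 := by
  refine (PySem.Chars.find_eq_neg_one_iff t p).mpr fun hinf => ?_
  obtain ⟨s, hs⟩ := (PySem.Chars.exists_prefix_drop_iff_isIn p t).mpr
    ((PySem.Chars.isIn_iff_infix p t).mpr hinf)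
  exact h s hs

lemma lpsLoop_spec (p : List Char) :
    ∀ fuel (lps : List Nat) (len i : Nat),
      1 ≤ i → i ≤ p.length → lps.length = p.length →
      2*p.length + 1 + len ≤ fuel + 2*i →
      (∀ k, k < i → lps.getD k 0 = brd (p.take (k+1))) →
      len < i → p.take len <:+ p.take i →
      (∀ b, b < i + 1 → (p.take i ++ [p.getD i ' ']).take b <:+ (p.take i ++ [p.getD i ' ']) → b ≤ len + 1) →
      ∀ k, k < p.length → (lpsLoop p fuel lps len i).getD k 0 = brd (p.take (k+1)) := by
  intro fuel
  induction fuel with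
  | zero => intro lps len i h1 him hlen hfuel _ _ _ _; exfalso; omega
  | succ fuel IH =>
    intro lps len i h1 him hlen hfuel hL1 hlt hsufI hII
    by_cases hi : i < p.length
    · have htake : p.take (i+1) = p.take i ++ [p.getD i ' '] := take_succ_getD hi
      have hleni : (p.take i).length = i := by simp; omega
      have hleni1 : (p.take (i+1)).length = i + 1 := by simp; omega
      have hne : p.take (i+1) ≠ [] := List.ne_nil_of_length_pos (by omega)
      have hb := brd_border hne
      rw [hleni1] at hb
      by_cases hc : p.getD i ' ' = p.getD len ' '
      · -- match branch
        have hbrd : brd (p.take (i+1)) = len + 1 := by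
          have hup : brd (p.take (i+1)) ≤ len + 1 :=
            hII (brd (p.take (i+1))) (by omega) (by rw [← htake]; exact hb.2)
          have hlow : len + 1 ≤ brd (p.take (i+1)) := by
            refine le_brd (by omega) ?_
            rw [htake]
            refine (border_append.mpr ⟨by omega, ?_, ?_⟩).2
            · rw [List.take_take, min_eq_left (by omega : len ≤ i)]
              exact hsufI
            · rw [getD_take (by omega) (by omega)]
              exact hc.symm
          omega
        rw [lpsLoop, if_pos hi, if_pos hc]
        refine IH (lps.set i (len+1)) (len+1) (i+1) (by omega) (by omega)
          (by simp [hlen]) (by omega) ?_ (by omega) ?_ ?_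
        · intro k hk
          have hklen : k < lps.length := by omega
          rw [List.getD_eq_getElem _ _ (by simpa using hklen), List.getElem_set]
          by_cases hki : i = k
          · rw [if_pos hki, ← hki]
            exact hbrd.symm
          · rw [if_neg hki, ← List.getD_eq_getElem lps 0 hklen]
            exact hL1 k (by omega)
        · have h2 := (brd_border hne).2
          rw [hbrd, List.take_take, min_eq_left (by omega)] at h2
          exact h2
        · intro b hbb hsuf
          have := borders_bounded_of_brd (q := p.take (i+1)) (p.getD (i+1) ' ') b
            (by omega) hsuf
          omega
      · -- mismatch
        by_cases h0 : len = 0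
        · -- len = 0: record lps[i] = 0 and advance
          have hbrd : brd (p.take (i+1)) = 0 := by
            by_contra hnz
            have hup : brd (p.take (i+1)) ≤ 1 := by
              have := hII (brd (p.take (i+1))) (by omega) (by rw [← htake]; exact hb.2)
              omega
            have hbe : brd (p.take (i+1)) = 1 := by omega
            have hb2 := hb.2
            rw [hbe, htake] at hb2
            have hba := border_append.mp ⟨by simp [hleni]; omega, hb2⟩
            rw [getD_take (by omega) (by omega)] at hba
            exact hc (hba.2.2.symm ▸ (h0 ▸ rfl))
          rw [lpsLoop, if_pos hi, if_neg hc, if_neg (by omega : ¬ len ≠ 0)]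
          refine IH (lps.set i 0) len (i+1) (by omega) (by omega)
            (by simp [hlen]) (by omega) ?_ (by omega) (h0 ▸ List.nil_suffix) ?_
          · intro k hk
            have hklen : k < lps.length := by omega
            rw [List.getD_eq_getElem _ _ (by simpa using hklen), List.getElem_set]
            by_cases hki : i = k
            · rw [if_pos hki, ← hki]
              exact hbrd.symm
            · rw [if_neg hki, ← List.getD_eq_getElem lps 0 hklen]
              exact hL1 k (by omega)
          · intro b hbb hsuf
            have := borders_bounded_of_brd (q := p.take (i+1)) (p.getD (i+1) ' ') b
              (by omega) hsuf
            omega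
        · -- len ≠ 0: fall back to lps[len-1]
          have hnewlen : lps.getD (len-1) 0 = brd (p.take len) := by
            have := hL1 (len-1) (by omega)
            rwa [show len - 1 + 1 = len by omega] at this
          have hlentake : (p.take len).length = len := by simp; omega
          have hnel : p.take len ≠ [] := List.ne_nil_of_length_pos (by omega)
          have hbl := brd_border hnel
          rw [hlentake] at hbl
          rw [lpsLoop, if_pos hi, if_neg hc, if_pos (by omega : len ≠ 0)]
          refine IH lps (lps.getD (len-1) 0) i h1 him hlen
            (by rw [hnewlen]; omega) hL1 (by rw [hnewlen]; omega) ?_ ?_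
          · rw [hnewlen]
            have h2 := hbl.2
            rw [List.take_take, min_eq_left (by omega)] at h2
            exact h2.trans hsufI
          · intro b hbb hsuf
            rw [hnewlen]
            match b, hbb with
            | 0, _ => omega
            | b+1, hbb =>
              have hble : b + 1 ≤ len + 1 := hII (b+1) hbb hsuf
              have hba := border_append.mp ⟨by simp [hleni]; omega, hsuf⟩
              by_cases hbl2 : b = len
              · rw [getD_take (by omega) (by omega)] at hba
                exact absurd (hbl2 ▸ hba.2.2).symm hc
              · have hblen : b < len := by omega
                have hble2 : b ≤ brd (p.take len) := by
                  refine le_brd (by rw [hlentake]; omega) ?_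
                  rw [List.take_take, min_eq_left (le_of_lt hblen)]
                  refine List.suffix_of_suffix_length_le ?_ hsufI (by simp; omega)
                  have hsfx := hba.2.1
                  rwa [List.take_take, min_eq_left (by omega : b ≤ i)] at hsfx
                omega
    · -- i = p.length : loop exits
      intro k hk
      rw [lpsLoop, if_neg hi]
      exact hL1 k (by omega)

lemma lps_correct {p : List Char} (hp : p ≠ []) :
    ∀ k, k < p.length → (computeLPSArray p).getD k 0 = brd (p.take (k+1)) := by
  have hm : 1 ≤ p.length := List.length_pos_iff.mpr hp
  have hlen1 : (p.take 1).length = 1 := by simp; omega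
  have hne1 : p.take 1 ≠ [] := List.ne_nil_of_length_pos (by omega)
  have hbrd1 : brd (p.take 1) = 0 := by
    have := (brd_border hne1).1
    omega
  refine lpsLoop_spec p (2*p.length+2) (List.replicate p.length 0) 0 1 le_rfl hm
    (by simp) (by omega) ?_ (by omega) (by simp) ?_
  · intro k hk
    have hk0 : k = 0 := by omega
    subst hk0
    rw [List.getD_replicate _ (by omega)]
    exact hbrd1.symm
  · intro b hb hsuf
    have := borders_bounded_of_brd (q := p.take 1) (p.getD 1 ' ') b (by omega) hsuf
    omega

lemma kmpLoop_spec (t p : List Char) (lps : List Nat)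
    (hlps : ∀ k, k < p.length → lps.getD k 0 = brd (p.take (k+1))) :
    ∀ fuel i j, j ≤ i → i ≤ t.length → j < p.length →
      p.take j <+: t.drop (i - j) →
      (∀ s, s < i - j → ¬ p <+: t.drop s) →
      2*t.length + 2 + j ≤ fuel + 2*i →
      kmpLoop t p lps fuel i j = PySem.Chars.find t p := by
  intro fuel
  induction fuel with
  | zero => intro i j _ hin _ _ _ hfuel; exfalso; omega
  | succ fuel IH =>
    intro i j hji hin hjm hmatch hno hfuel
    have hm : 1 ≤ p.length := by omega
    by_cases hi : i < t.length
    · rw [kmpLoop, if_pos hi]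
      by_cases hc : p.getD j ' ' = t.getD i ' '
      · -- character match: advance both indices
        simp only [if_pos hc]
        have hext : p.take (j+1) <+: t.drop (i - j) := matched_extend hji hi hjm hmatch hc
        by_cases hjm1 : j + 1 = p.length
        · rw [if_pos hjm1]
          have hfull : p <+: t.drop (i - j) := by
            rw [← List.take_length (l := p), ← hjm1]
            exact hext
          rw [find_eq_of_first hfull hno]
          push_cast
          omega
        · rw [if_neg hjm1]
          have hjm' : j + 1 < p.length := by omega
          by_cases helif : i + 1 < t.length ∧ p.getD (j+1) ' ' ≠ t.getD (i+1) ' '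
          · rw [if_pos helif, if_pos (by omega : j + 1 ≠ 0)]
            have hlj : lps.getD (j + 1 - 1) 0 = brd (p.take (j+1)) := by
              rw [show j + 1 - 1 = j from rfl]
              have := hlps j (by omega)
              exact this
            have hnej : p.take (j+1) ≠ [] := List.ne_nil_of_length_pos (by simp; omega)
            have hbj := brd_border hnej
            have hlenj1 : (p.take (j+1)).length = j + 1 := by simp; omega
            rw [hlenj1] at hbj
            rw [hlj]
            refine IH (i+1) (brd (p.take (j+1))) (by omega) (by omega) (by omega) ?_ ?_ (by omega)
            · have hsufj : p.take (brd (p.take (j+1))) <:+ p.take (j+1) := by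
                have h2 := (brd_border hnej).2
                rwa [List.take_take, min_eq_left (by omega)] at h2
              have := prefix_drop_of_suffix_of_prefix hext hsufj
              rw [hlenj1, List.length_take, min_eq_left (by omega : brd (p.take (j+1)) ≤ p.length)] at this
              rwa [show i - j + (j + 1 - brd (p.take (j+1))) = i + 1 - brd (p.take (j+1)) by omega] at this
            · intro s hs
              by_cases hs' : s < i - j
              · exact hno s hs'
              · refine no_occ_of_mismatch (I := i+1) (J := j+1) (by omega) hjm' (by omega)
                  helif.1 (by rwa [show i + 1 - (j+1) = i - j by omega]) helif.2 (by omega) hs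
          · rw [if_neg helif]
            refine IH (i+1) (j+1) (by omega) (by omega) hjm'
              (by rwa [show i + 1 - (j+1) = i - j by omega]) ?_ (by omega)
            intro s hs
            exact hno s (by omega)
      · -- character mismatch
        simp only [if_neg hc]
        rw [if_neg (by omega : ¬ j = p.length), if_pos ⟨hi, hc⟩]
        by_cases hj0 : j = 0
        · rw [if_neg (by omega : ¬ j ≠ 0)]
          refine IH (i+1) j (by omega) (by omega) hjm (by simp [hj0]) ?_ (by omega)
          intro s hs
          by_cases hs' : s < i - j
          · exact hno s hs'
          · intro hocc
            have hsi : s = i := by omega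
            have := getD_of_prefix hocc (k := 0) (by omega)
            rw [getD_drop (by omega : s + 0 < t.length)] at this
            rw [show s + 0 = i by omega] at this
            exact hc (hj0 ▸ this)
        · rw [if_pos hj0]
          have hlj : lps.getD (j - 1) 0 = brd (p.take j) := by
            have := hlps (j-1) (by omega)
            rwa [show j - 1 + 1 = j by omega] at this
          have hnej : p.take j ≠ [] := List.ne_nil_of_length_pos (by simp; omega)
          have hbj := brd_border hnej
          have hlenj : (p.take j).length = j := by simp; omega
          rw [hlenj] at hbj
          rw [hlj]
          refine IH i (brd (p.take j)) (by omega) hin (by omega) ?_ ?_ (by omega)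
          · have hsufj : p.take (brd (p.take j)) <:+ p.take j := by
              have h2 := (brd_border hnej).2
              rwa [List.take_take, min_eq_left (by omega)] at h2
            have := prefix_drop_of_suffix_of_prefix hmatch hsufj
            rw [hlenj, List.length_take, min_eq_left (by omega : brd (p.take j) ≤ p.length)] at this
            rwa [show i - j + (j - brd (p.take j)) = i - brd (p.take j) by omega] at this
          · intro s hs
            by_cases hs' : s < i - j
            · exact hno s hs'
            · exact no_occ_of_mismatch (by omega : 1 ≤ j) hjm hji hi hmatch hc (by omega) hs
    · -- i = t.length : scan exhausted, no occurrence anywhere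
      rw [kmpLoop, if_neg hi]
      refine (find_eq_neg_one_of_no_occ fun s hocc => ?_).symm
      by_cases hs : s < i - j
      · exact hno s hs hocc
      · have := hocc.length_le
        rw [List.length_drop] at this
        omega

lemma KMP_eq_find (t p : List Char) (hp : p ≠ []) : KMP t p = PySem.Chars.find t p := by
  refine kmpLoop_spec t p _ (lps_correct hp) (2*t.length+2) 0 0 le_rfl (Nat.zero_le _)
    (List.length_pos_iff.mpr hp) ?_ (by omega) (by omega)
  simp

-- ===== VERDICT (by name: the statement is the Claim_ definition above) =====
theorem searchWordIndex_spec : Claim_equal_searchWordIndex := by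
  intro sentence searchWord _
  unfold Spec_searchWordIndex searchWordIndex searchWordIndex_alt
  by_cases h : PySem.Chars.startswith sentence.toList searchWord.toList
  · simp [h]
  · simp only [h, if_false, Bool.false_eq_true]
    rw [KMP_eq_find _ _ (by simp)]
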